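-- pv_equiv track=rewrite | github.com/marcelotduarte/cx_Freeze | ci/_platform.py | is_supported_platform
-- ===== SOURCE A (Python) =====
-- PLATFORM_SUPPORT = {
--     "linux": ["64", "arm64"],
--     "macos": ["64", "arm64"],
--     "mingw": ["clang64", "mingw64", "ucrt64", "mingw32"],
--     "windows": ["32", "64", "arm64"],
-- }
--
-- def is_supported_platform(
--     platform: str | list[str] | None,
--     supported_platform: str,
--     supported_variant: str | None,  # noqa: ARG001 (not used yet)
-- ) -> bool:
--     if isinstance(platform, str):
--         platform = platform.split(",")
--     # if not specified, the platform is supported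
--     if not platform:
--         return True
--
--     # supported platforms
--     platform_support = PLATFORM_SUPPORT.keys()
--     platform_yes = {
--         plat.split(":")[0] for plat in platform if not plat.startswith("!")
--     }
--     if platform_yes:
--         platform_support = platform_yes
--     platform_not = {
--         plat[1:].split(":")[0] for plat in platform if plat.startswith("!")
--     }
--     if platform_not:
--         platform_support -= platform_not
--     return supported_platform in platform_support
-- ===== SOURCE B (Python) =====
-- PLATFORM_SUPPORT = {
--     "linux": ["64", "arm64"],
--     "macos": ["64", "arm64"],
--     "mingw": ["clang64", "mingw64", "ucrt64", "mingw32"],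
--     "windows": ["32", "64", "arm64"],
-- }
--
--
-- def is_supported_platform(
--     platform: str | list[str] | None,
--     supported_platform: str,
--     supported_variant: str | None,
-- ) -> bool:
--     if isinstance(platform, str):
--         platform = platform.split(",")
--     # if not specified, the platform is supported
--     if not platform:
--         return True
--
--     # one pass: no sets, no set subtraction
--     any_yes = hit_yes = hit_not = False
--     for plat in platform:
--         if plat.startswith("!"):
--             if plat[1:].split(":")[0] == supported_platform:
--                 hit_not = True
--         else:
--             any_yes = True
--             if plat.split(":")[0] == supported_platform:
--                 hit_yes = True
--     if any_yes:
--         return hit_yes and not hit_not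
--     return supported_platform in PLATFORM_SUPPORT and not hit_not
-- ===== Notes on version B (the rewrite author's own statement) =====
-- stated objective: simpler
-- what changed: Replaces the two set comprehensions, the default-to-keys set swap and the set subtraction with a single pass over the list that tracks three booleans (any positive entry, positive hit, negated hit) and combines them at the end.
import Mathlib
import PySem

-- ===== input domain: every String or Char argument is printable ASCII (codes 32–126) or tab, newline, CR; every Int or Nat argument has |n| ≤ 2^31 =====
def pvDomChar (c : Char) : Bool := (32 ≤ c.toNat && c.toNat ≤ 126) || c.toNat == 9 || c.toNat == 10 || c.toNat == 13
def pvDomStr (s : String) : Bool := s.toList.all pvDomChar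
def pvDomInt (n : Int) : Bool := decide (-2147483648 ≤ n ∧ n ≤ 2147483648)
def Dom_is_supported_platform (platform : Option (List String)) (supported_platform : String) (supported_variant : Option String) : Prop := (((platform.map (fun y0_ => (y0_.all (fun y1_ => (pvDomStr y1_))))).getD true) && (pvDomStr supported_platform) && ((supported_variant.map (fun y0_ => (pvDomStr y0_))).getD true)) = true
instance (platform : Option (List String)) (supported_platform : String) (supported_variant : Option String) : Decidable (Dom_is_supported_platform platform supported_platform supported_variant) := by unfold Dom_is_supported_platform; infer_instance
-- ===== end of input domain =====

-- B replaces A's two set comprehensions, keys-default swap and set subtraction by a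
-- single pass keeping three booleans (objective: simpler).
-- The Lean signature takes Option (List String), so Python's str-input branch
-- (platform.split(",")) is outside the ported type and both ports start at the list case.

-- ===== PORT A =====

-- plat.split(":")[0]  (split with a nonempty separator always yields a nonempty list,
-- so [0] never raises; headD "" is exact)
def pvPfx (s : String) : String := ((PySem.Str.split? s ":").getD []).headD ""

-- plat[1:]  (the slice [1:] of a string is exactly dropping its first char)
def pvTail1 (s : String) : String := String.ofList (s.toList.drop 1)

def pvKeys : List String := ["linux", "macos", "mingw", "windows"]

def is_supported_platform (platform : Option (List String)) (supported_platform : String) (supported_variant : Option String) : Bool :=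
  match platform with
  | none => true
  | some plats =>
    if plats = [] then true
    else
      -- platform_yes = {plat.split(":")[0] for plat in platform if not plat.startswith("!")}
      let platform_yes : PySem.Set String :=
        PySem.Set.ofList ((plats.filter (fun p => !(PySem.Str.startswith p "!"))).map pvPfx)
      -- platform_support = platform_yes if nonempty else PLATFORM_SUPPORT.keys()
      let platform_support : PySem.Set String :=
        if platform_yes ≠ [] then platform_yes else PySem.Set.ofList pvKeys
      -- platform_not = {plat[1:].split(":")[0] for plat in platform if plat.startswith("!")}
      let platform_not : PySem.Set String :=
        PySem.Set.ofList ((plats.filter (fun p => PySem.Str.startswith p "!")).map (fun p => pvPfx (pvTail1 p)))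
      let platform_support :=
        if platform_not ≠ [] then PySem.Set.diff platform_support platform_not else platform_support
      PySem.Set.contains platform_support supported_platform

-- ===== PORT B =====

-- state = (any_yes, hit_yes, hit_not)
def pvStep (sp : String) (s : Bool × Bool × Bool) (p : String) : Bool × Bool × Bool :=
  if PySem.Str.startswith p "!" then
    (s.1, s.2.1, s.2.2 || (pvPfx (pvTail1 p) == sp))
  else
    (true, s.2.1 || (pvPfx p == sp), s.2.2)

def is_supported_platform_alt (platform : Option (List String)) (supported_platform : String) (supported_variant : Option String) : Bool :=
  match platform with
  | none => true
  | some plats =>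
    if plats = [] then true
    else
      let st := plats.foldl (pvStep supported_platform) (false, false, false)
      (if st.1 then st.2.1 else pvKeys.contains supported_platform) && !st.2.2

-- ===== PRECONDITION & SPEC =====
def Spec_is_supported_platform (platform : Option (List String)) (supported_platform : String) (supported_variant : Option String) (out : Bool) : Prop := out = is_supported_platform_alt platform supported_platform supported_variant
instance (platform : Option (List String)) (supported_platform : String) (supported_variant : Option String) (out : Bool) : Decidable (Spec_is_supported_platform platform supported_platform supported_variant out) := by unfold Spec_is_supported_platform; infer_instance

-- ===== CLAIM (what is proved, stated in full; the proofs are below) =====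
def Claim_equal_is_supported_platform : Prop := ∀ (platform : Option (List String)) (supported_platform : String) (supported_variant : Option String), Dom_is_supported_platform platform supported_platform supported_variant → Spec_is_supported_platform platform supported_platform supported_variant (is_supported_platform platform supported_platform supported_variant)

-- ===== LEMMAS AND PROOFS =====

-- B's fold computes three 'any' predicates
theorem pvFold_eq (sp : String) (l : List String) (a b c : Bool) :
    l.foldl (pvStep sp) (a, b, c) =
      (a || l.any (fun p => !(PySem.Str.startswith p "!")),
       b || l.any (fun p => !(PySem.Str.startswith p "!") && (pvPfx p == sp)),
       c || l.any (fun p => PySem.Str.startswith p "!" && (pvPfx (pvTail1 p) == sp))) := by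
  induction l generalizing a b c with
  | nil => simp
  | cons x xs ih =>
    rw [List.foldl_cons]
    by_cases h : PySem.Str.startswith x "!" = true
    · rw [show pvStep sp (a, b, c) x = (a, b, c || (pvPfx (pvTail1 x) == sp)) by
        simp only [pvStep]; rw [if_pos h], ih]
      have h' : PySem.Chars.startswith x.toList ['!'] = true := by simpa using h
      simp [h', Bool.or_assoc]
    · rw [show pvStep sp (a, b, c) x = (true, b || (pvPfx x == sp), c) by
        simp only [pvStep]; rw [if_neg h], ih]
      have h' : PySem.Chars.startswith x.toList ['!'] = false := by
        rw [Bool.not_eq_true] at h; simpa using h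
      simp [h', Bool.or_assoc]

theorem pvOfList_ne_nil_iff {α : Type} [BEq α] [LawfulBEq α] (xs : List α) :
    PySem.Set.ofList xs ≠ [] ↔ xs ≠ [] := by
  constructor
  · intro h hx; exact h (by simp [hx, PySem.Set.ofList])
  · intro h hx
    cases xs with
    | nil => exact h rfl
    | cons y ys =>
      have : y ∈ PySem.Set.ofList (y :: ys) := (PySem.Set.mem_ofList _ _).mpr (List.mem_cons_self ..)
      rw [hx] at this; exact absurd this (List.not_mem_nil)

-- membership in a comprehension-built set {f p for p in l if q p}
theorem pvMem_comp_iff (sp : String) (l : List String) (q : String → Bool) (f : String → String) :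
    sp ∈ PySem.Set.ofList ((l.filter q).map f) ↔ (l.any fun p => q p && (f p == sp)) = true := by
  rw [PySem.Set.mem_ofList, List.mem_map, List.any_eq_true]
  constructor
  · rintro ⟨p, hp, hpx⟩
    rw [List.mem_filter] at hp
    exact ⟨p, hp.1, by simp [hp.2, hpx]⟩
  · rintro ⟨p, hp, hpx⟩
    simp only [Bool.and_eq_true, beq_iff_eq] at hpx
    exact ⟨p, List.mem_filter.mpr ⟨hp, hpx.1⟩, hpx.2⟩

-- nonemptiness of that set
theorem pvComp_ne_nil_iff (l : List String) (q : String → Bool) (f : String → String) :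
    PySem.Set.ofList ((l.filter q).map f) ≠ [] ↔ (l.any q) = true := by
  rw [pvOfList_ne_nil_iff, ne_eq, List.map_eq_nil_iff, List.filter_eq_nil_iff, List.any_eq_true]
  push Not
  simp

-- ===== VERDICT =====
theorem is_supported_platform_spec : Claim_equal_is_supported_platform := by
  intro platform sp sv _
  unfold Spec_is_supported_platform is_supported_platform is_supported_platform_alt
  cases platform with
  | none => rfl
  | some plats =>
    simp only
    by_cases hnil : plats = []
    · simp [hnil]
    · rw [if_neg hnil, if_neg hnil, pvFold_eq]
      simp only [Bool.false_or]
      rw [Bool.eq_iff_iff, PySem.Set.contains_iff]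
      -- peel off the '!'-set
      have hmain : ∀ s : PySem.Set String,
          (sp ∈ if PySem.Set.ofList ((plats.filter (fun p => PySem.Str.startswith p "!")).map (fun p => pvPfx (pvTail1 p))) ≠ []
                then PySem.Set.diff s (PySem.Set.ofList ((plats.filter (fun p => PySem.Str.startswith p "!")).map (fun p => pvPfx (pvTail1 p))))
                else s)
          ↔ sp ∈ s ∧ (plats.any fun p => PySem.Str.startswith p "!" && (pvPfx (pvTail1 p) == sp)) = false := by
        intro s
        by_cases hNN : PySem.Set.ofList ((plats.filter (fun p => PySem.Str.startswith p "!")).map (fun p => pvPfx (pvTail1 p))) = []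
        · rw [if_neg (not_not_intro hNN)]
          have hHNf : (plats.any fun p => PySem.Str.startswith p "!" && (pvPfx (pvTail1 p) == sp)) = false := by
            rw [← Bool.not_eq_true, ← pvMem_comp_iff, hNN]
            exact List.not_mem_nil
          rw [hHNf]
          simp
        · rw [if_pos hNN, PySem.Set.mem_diff, pvMem_comp_iff]
          rw [← Bool.not_eq_true, Bool.not_eq_true]
      rw [hmain]
      by_cases hY : PySem.Set.ofList ((plats.filter (fun p => !(PySem.Str.startswith p "!"))).map pvPfx) ≠ []
      · have hA : (plats.any fun p => !(PySem.Str.startswith p "!")) = true :=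
          (pvComp_ne_nil_iff ..).mp hY
        rw [if_pos hY, if_pos hA, pvMem_comp_iff]
        simp only [Bool.and_eq_true, Bool.not_eq_true']
      · have hA : (plats.any fun p => !(PySem.Str.startswith p "!")) = false := by
          rw [← Bool.not_eq_true, ← pvComp_ne_nil_iff plats (fun p => !(PySem.Str.startswith p "!")) pvPfx]
          exact not_not.mp (by simpa using hY)
        rw [if_neg hY, if_neg (by rw [hA]; simp), PySem.Set.mem_ofList]
        simp only [Bool.and_eq_true, Bool.not_eq_true', List.contains_iff_mem]
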